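-- pv_equiv track=rewrite | github.com/sproutsai-engg/coding_question_generator | json_files/python_codes/Q_1232.py | findBestValue
-- ===== SOURCE A (Python) =====
-- def findBestValue(arr, target):
--     left = 0
--     right = max(arr)
--     result = -1
--     min_diff = float('inf')
--
--     while left <= right:
--         mid = left + (right - left) // 2
--         total_sum = sum(min(x, mid) for x in arr)
--         if total_sum == target:
--             return mid
--         elif total_sum > target:
--             right = mid - 1
--         else:
--             left = mid + 1
--
--         if abs(target - total_sum) < min_diff or (
--                 abs(target - total_sum) == min_diff and mid < result):
--             min_diff = abs(target - total_sum)
--             result = mid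
--
--     return result
-- ===== SOURCE B (Python) =====
-- def findBestValue(arr, target):
--     # Sort once and keep prefix sums, so each binary-search step evaluates
--     # sum(min(x, mid) for x in arr) in O(log n) by bisection instead of an O(n) scan.
--     a = sorted(arr)
--     n = len(a)
--     s = 0
--     prefix = [0]
--     for x in a:
--         s += x
--         prefix.append(s)
--
--     def clipped_sum(v):
--         # i = number of elements <= v, by binary search on the sorted list
--         lo, hi = 0, n
--         while lo < hi:
--             m = (lo + hi) // 2
--             if a[m] <= v:
--                 lo = m + 1
--             else:
--                 hi = m
--         return prefix[lo] + v * (n - lo)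
--
--     # binary search on the value; keep the lexicographically smallest
--     # (|target - sum|, value) pair seen, which is the closest value (ties -> smaller)
--     best = None
--     left, right = 0, a[n - 1]
--     while left <= right:
--         mid = (left + right) // 2
--         total = clipped_sum(mid)
--         if total == target:
--             return mid
--         if total > target:
--             right = mid - 1
--         else:
--             left = mid + 1
--         cand = (abs(target - total), mid)
--         if best is None or cand < best:
--             best = cand
--     return -1 if best is None else best[1]
-- ===== Notes on version B (the rewrite author's own statement) =====
-- stated objective: faster
-- what changed: B sorts the array once and keeps prefix sums, so each binary-search step computes sum(min(x,mid)) by a O(log n) binary search over the sorted list instead of an O(n) scan of the whole array.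
import Mathlib
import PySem

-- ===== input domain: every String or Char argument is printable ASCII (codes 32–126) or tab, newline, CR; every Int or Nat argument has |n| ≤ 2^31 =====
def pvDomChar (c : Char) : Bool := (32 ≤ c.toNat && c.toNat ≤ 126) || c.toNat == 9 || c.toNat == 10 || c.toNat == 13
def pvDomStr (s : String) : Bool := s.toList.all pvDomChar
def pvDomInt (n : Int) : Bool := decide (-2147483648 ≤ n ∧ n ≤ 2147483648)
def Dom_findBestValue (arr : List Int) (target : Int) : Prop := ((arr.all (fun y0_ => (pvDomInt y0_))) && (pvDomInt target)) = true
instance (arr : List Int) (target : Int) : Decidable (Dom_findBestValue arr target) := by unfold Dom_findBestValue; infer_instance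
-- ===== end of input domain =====

-- B sorts once and keeps prefix sums so each binary-search step evaluates sum(min(x,mid))
-- by bisection instead of a full scan, and tracks the best value as a lexicographic
-- (|target-sum|, value) minimum; return values agree (neither mutates arr).

-- ===== PORT A =====
-- update test: abs(target-total) < min_diff or (abs == min_diff and mid < result); none = inf
def updCond (d : Int) (minDiff : Option Int) (mid result : Int) : Bool :=
  match minDiff with
  | none => true
  | some md => d < md || (d == md && mid < result)

-- the while-loop of A; min_diff = none models float('inf').  The loop shrinks
-- right-left+1 by at least 1 per iteration, so fuel = (right+1-left).toNat never
-- runs out while left ≤ right; the fuel-0 branch repeats the loop-exit value.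
def loopA (arr : List Int) (target : Int) (fuel : Nat) (left right result : Int)
    (minDiff : Option Int) : Int :=
  match fuel with
  | 0 => result
  | fuel + 1 =>
    if left ≤ right then
      let mid := left + PySem.Int.floordiv (right - left) 2
      let totalSum := (arr.map (fun x => min x mid)).sum   -- sum(min(x, mid) for x in arr)
      if totalSum = target then mid
      else
        let left' := if totalSum > target then left else mid + 1
        let right' := if totalSum > target then mid - 1 else right
        if updCond |target - totalSum| minDiff mid result then
          loopA arr target fuel left' right' mid (some |target - totalSum|)
        else
          loopA arr target fuel left' right' result minDiff
    else result

def findBestValue (arr : List Int) (target : Int) : Int :=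
  -- right = max(arr); arr = [] raises ValueError in Python and is excluded by Pre_
  let right := (PySem.List.max? arr (fun x => x)).getD 0
  loopA arr target (right + 1).toNat 0 right (-1) none

-- ===== PORT B =====
-- prefix sums: s = 0; prefix = [0]; for x in a: s += x; prefix.append(s)
def prefixSums : List Int → Int → List Int
  | [], s => [s]
  | x :: xs, s => s :: prefixSums xs (s + x)

-- the hand-written bisect loop of B: lo, hi = 0, n; while lo < hi: …
-- hi - lo shrinks by at least 1 per iteration, so fuel = hi - lo suffices
def bsearchCount (a : List Int) (v : Int) (fuel lo hi : Nat) : Nat :=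
  match fuel with
  | 0 => lo
  | fuel + 1 =>
    if lo < hi then
      let m := (lo + hi) / 2
      if a.getD m 0 ≤ v then bsearchCount a v fuel (m + 1) hi   -- a[m] always in range: m < hi ≤ len a
      else bsearchCount a v fuel lo m
    else lo

-- clipped_sum(v) = prefix[lo] + v * (n - lo)
def clipSum (a pre : List Int) (n : Nat) (v : Int) : Int :=
  let i := bsearchCount a v n 0 n
  pre.getD i 0 + v * ((n : Int) - (i : Int))

-- Python tuple comparison cand < best on (Int, Int) pairs: lexicographic
def ltPair (p q : Int × Int) : Bool := p.1 < q.1 || (p.1 == q.1 && p.2 < q.2)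

-- the while-loop of B: best = None | (diff, value); same fuel discipline as loopA
def loopB (a pre : List Int) (n : Nat) (target : Int) (fuel : Nat) (left right : Int)
    (best : Option (Int × Int)) : Int :=
  match fuel with
  | 0 => (match best with | none => -1 | some p => p.2)
  | fuel + 1 =>
    if left ≤ right then
      let mid := PySem.Int.floordiv (left + right) 2
      let total := clipSum a pre n mid
      if total = target then mid
      else
        let left' := if total > target then left else mid + 1
        let right' := if total > target then mid - 1 else right
        let cand := (|target - total|, mid)
        let best' := match best with
          | none => some cand
          | some b => if ltPair cand b then some cand else some b
        loopB a pre n target fuel left' right' best'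
    else (match best with | none => -1 | some p => p.2)

def findBestValue_alt (arr : List Int) (target : Int) : Int :=
  let a := PySem.List.sorted arr (fun x => x) false
  let n := a.length
  let pre := prefixSums a 0
  -- right = a[n-1]; arr = [] raises IndexError in Python and is excluded by Pre_
  let right := (PySem.List.pyGet? a ((n : Int) - 1)).getD 0
  loopB a pre n target (right + 1).toNat 0 right none

-- ===== PRECONDITION & SPEC =====
-- Python A raises ValueError (max of empty) on arr = []; excluded.
def Pre_findBestValue (arr : List Int) (target : Int) : Prop := arr ≠ []
instance (arr : List Int) (target : Int) : Decidable (Pre_findBestValue arr target) := by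
  unfold Pre_findBestValue; infer_instance

def pvWitness_findBestValue : List Int × Int := ([2, 7, 1], 10)

def Spec_findBestValue (arr : List Int) (target : Int) (out : Int) : Prop := out = findBestValue_alt arr target
instance (arr : List Int) (target : Int) (out : Int) : Decidable (Spec_findBestValue arr target out) := by unfold Spec_findBestValue; infer_instance

-- ===== CLAIM (what is proved, stated in full; the proofs are below) =====
def Claim_equal_findBestValue : Prop := ∀ (arr : List Int) (target : Int), Dom_findBestValue arr target → Pre_findBestValue arr target → Spec_findBestValue arr target (findBestValue arr target)

-- ===== LEMMAS AND PROOFS =====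

-- bsearchCount finds the split point of the sorted list a around v
theorem bsearchCount_spec (a : List Int) (v : Int)
    (hmono : ∀ p q : Nat, (hpq : p ≤ q) → (hq : q < a.length) → a[p]'(by omega) ≤ a[q]) :
    ∀ (fuel lo hi : Nat), hi - lo ≤ fuel → lo ≤ hi → hi ≤ a.length →
    (∀ j : Nat, j < lo → (hj : j < a.length) → a[j] ≤ v) →
    (∀ j : Nat, hi ≤ j → (hj : j < a.length) → v < a[j]) →
    lo ≤ bsearchCount a v fuel lo hi ∧ bsearchCount a v fuel lo hi ≤ hi ∧
    (∀ j : Nat, j < bsearchCount a v fuel lo hi → (hj : j < a.length) → a[j] ≤ v) ∧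
    (∀ j : Nat, bsearchCount a v fuel lo hi ≤ j → (hj : j < a.length) → v < a[j]) := by
  intro fuel
  induction fuel with
  | zero =>
    intro lo hi hfuel hlo hhi h1 h2
    have : lo = hi := by omega
    simp only [bsearchCount]
    exact ⟨le_rfl, by omega, h1, fun j hj hjl => h2 j (by omega) hjl⟩
  | succ fuel ih =>
    intro lo hi hfuel hlo hhi h1 h2
    by_cases hlt : lo < hi
    · have hm : (lo + hi) / 2 < a.length := by omega
      rw [bsearchCount]
      simp only [if_pos hlt]
      by_cases hle : a.getD ((lo + hi) / 2) 0 ≤ v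
      · have hmv : a[(lo + hi) / 2] ≤ v := by
          rw [List.getD_eq_getElem?_getD, List.getElem?_eq_getElem hm] at hle
          simpa using hle
        have inv1 : ∀ j : Nat, j < (lo + hi) / 2 + 1 → (hj : j < a.length) → a[j] ≤ v := by
          intro j hj hjl
          exact le_trans (hmono j ((lo + hi) / 2) (by omega) hm) hmv
        obtain ⟨r1, r2, r3, r4⟩ := ih ((lo + hi) / 2 + 1) hi (by omega) (by omega) hhi inv1 h2
        simp only [if_pos hle]
        exact ⟨by omega, r2, r3, r4⟩
      · have hmv : v < a[(lo + hi) / 2] := by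
          rw [List.getD_eq_getElem?_getD, List.getElem?_eq_getElem hm] at hle
          simpa using hle
        have inv2 : ∀ j : Nat, (lo + hi) / 2 ≤ j → (hj : j < a.length) → v < a[j] := by
          intro j hj hjl
          exact lt_of_lt_of_le hmv (hmono ((lo + hi) / 2) j hj hjl)
        obtain ⟨r1, r2, r3, r4⟩ := ih lo ((lo + hi) / 2) (by omega) (by omega) (by omega) h1 inv2
        simp only [if_neg hle]
        exact ⟨r1, by omega, r3, r4⟩
    · have : lo = hi := by omega
      rw [bsearchCount]
      simp only [if_neg hlt]
      exact ⟨le_rfl, by omega, h1, fun j hj hjl => h2 j (by omega) hjl⟩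

-- sum of clipped values splits at the split point
theorem sum_min_split (a : List Int) (v : Int) :
    ∀ k : Nat, k ≤ a.length →
    (∀ j : Nat, j < k → (hj : j < a.length) → a[j] ≤ v) →
    (∀ j : Nat, k ≤ j → (hj : j < a.length) → v < a[j]) →
    (a.map (fun x => min x v)).sum = (a.take k).sum + v * ((a.length : Int) - (k : Int)) := by
  induction a with
  | nil => intro k hk _ _; simp at hk; subst hk; simp
  | cons x xs ih =>
    intro k hk h1 h2
    cases k with
    | zero =>
      have hx : v < x := by simpa using h2 0 (by omega) (by simp)
      have hxs : ∀ j : Nat, 0 ≤ j → (hj : j < xs.length) → v < xs[j] := by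
        intro j _ hj
        simpa using h2 (j + 1) (by omega) (by simp; omega)
      rw [List.map_cons, List.sum_cons, ih 0 (by omega) (by omega) hxs]
      have : min x v = v := min_eq_right (le_of_lt hx)
      rw [this]
      simp only [List.length_cons, List.take_zero, List.sum_nil]
      push_cast
      ring
    | succ k' =>
      have hx : x ≤ v := by simpa using h1 0 (by omega) (by simp)
      have hxs1 : ∀ j : Nat, j < k' → (hj : j < xs.length) → xs[j] ≤ v := by
        intro j hj hjl
        simpa using h1 (j + 1) (by omega) (by simp; omega)
      have hxs2 : ∀ j : Nat, k' ≤ j → (hj : j < xs.length) → v < xs[j] := by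
        intro j hj hjl
        simpa using h2 (j + 1) (by omega) (by simp; omega)
      rw [List.map_cons, List.sum_cons, ih k' (by simpa using hk) hxs1 hxs2]
      have : min x v = x := min_eq_left hx
      rw [this, List.take_succ_cons, List.sum_cons]
      simp only [List.length_cons]
      push_cast
      ring

-- prefixSums read back
theorem prefixSums_getD (a : List Int) :
    ∀ (s : Int) (k : Nat), k ≤ a.length → (prefixSums a s).getD k 0 = s + (a.take k).sum := by
  induction a with
  | nil =>
    intro s k hk
    simp at hk
    subst hk; simp [prefixSums]
  | cons x xs ih =>
    intro s k hk
    cases k with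
    | zero => simp [prefixSums]
    | succ k' =>
      simp only [prefixSums, List.getD_cons_succ, List.take_succ_cons, List.sum_cons]
      rw [ih (s + x) k' (by simpa using hk)]
      ring

-- clipSum computes A's inner sum
theorem clipSum_eq (arr : List Int) (v : Int) :
    clipSum (PySem.List.sorted arr (fun x => x) false)
      (prefixSums (PySem.List.sorted arr (fun x => x) false) 0)
      (PySem.List.sorted arr (fun x => x) false).length v
      = (arr.map (fun x => min x v)).sum := by
  set a := PySem.List.sorted arr (fun x => x) false with ha
  have hmono : ∀ p q : Nat, (hpq : p ≤ q) → (hq : q < a.length) → a[p]'(by omega) ≤ a[q] := by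
    intro p q hpq hq
    simpa using PySem.List.key_sorted_getElem_mono arr (fun x => x) hpq (by simpa [ha] using hq)
  obtain ⟨h0, hle, hs1, hs2⟩ :=
    bsearchCount_spec a v hmono a.length 0 a.length (by omega) (by omega) le_rfl
      (by intro j hj hjl; exact absurd hj (by omega))
      (by intro j hj hjl; exact absurd hjl (by omega))
  simp only [clipSum]
  rw [prefixSums_getD a 0 (bsearchCount a v a.length 0 a.length) hle]
  have hsum := sum_min_split a v (bsearchCount a v a.length 0 a.length) hle hs1 hs2
  have hperm : (arr.map (fun x => min x v)).sum = (a.map (fun x => min x v)).sum :=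
    (((PySem.List.sorted_perm arr (fun x => x) false).map _).sum_eq).symm
  rw [hperm, hsum]
  ring

-- the two midpoint formulas agree: left + (right-left)//2 = (left+right)//2
theorem mid_eq (l r : Int) :
    l + PySem.Int.floordiv (r - l) 2 = PySem.Int.floordiv (l + r) 2 := by
  rw [PySem.Int.floordiv_eq_ediv_of_pos (by norm_num),
    PySem.Int.floordiv_eq_ediv_of_pos (by norm_num)]
  omega

-- the state correspondence between A's (result, min_diff) and B's best pair
def stRel (result : Int) (minDiff : Option Int) (best : Option (Int × Int)) : Prop :=
  (minDiff = none ∧ result = -1 ∧ best = none) ∨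
  (∃ md, minDiff = some md ∧ best = some (md, result))

-- the two loops agree on related states
theorem loops_eq (arr : List Int) (target : Int) :
    ∀ (fuel : Nat) (left right result : Int) (minDiff : Option Int)
      (best : Option (Int × Int)), stRel result minDiff best →
    loopA arr target fuel left right result minDiff =
      loopB (PySem.List.sorted arr (fun x => x) false)
        (prefixSums (PySem.List.sorted arr (fun x => x) false) 0)
        (PySem.List.sorted arr (fun x => x) false).length
        target fuel left right best := by
  intro fuel
  induction fuel with
  | zero =>
    intro l r res md best hrel
    rcases hrel with ⟨hmd, hres, hbest⟩ | ⟨m, hmd, hbest⟩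
    · simp [loopA, loopB, hbest, hres]
    · simp [loopA, loopB, hbest]
  | succ fuel ih =>
    intro l r res md best hrel
    simp only [loopA, loopB]
    by_cases hlr : l ≤ r
    · simp only [if_pos hlr, clipSum_eq arr, mid_eq l r]
      by_cases htot : (arr.map (fun x => min x (PySem.Int.floordiv (l + r) 2))).sum = target
      · simp only [if_pos htot]
      · simp only [if_neg htot]
        rcases hrel with ⟨hmd, hres, hbest⟩ | ⟨m, hmd, hbest⟩
        · subst hmd; subst hbest
          simp only [updCond, if_true]
          exact ih _ _ _ _ _ (Or.inr ⟨_, rfl, rfl⟩)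
        · subst hmd; subst hbest
          simp only [updCond, ltPair]
          by_cases hupd : (|target - (arr.map (fun x => min x (PySem.Int.floordiv (l + r) 2))).sum| < m
              || (|target - (arr.map (fun x => min x (PySem.Int.floordiv (l + r) 2))).sum| == m
                  && PySem.Int.floordiv (l + r) 2 < res)) = true
          · simp only [hupd, if_true]
            exact ih _ _ _ _ _ (Or.inr ⟨_, rfl, rfl⟩)
          · simp only [hupd, Bool.false_eq_true, if_false]
            exact ih _ _ _ _ _ (Or.inr ⟨m, rfl, rfl⟩)
    · rcases hrel with ⟨hmd, hres, hbest⟩ | ⟨m, hmd, hbest⟩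
      · simp [hlr, hbest, hres]
      · simp [hlr, hbest]

-- max(arr) = sorted(arr)[-1] on a nonempty list
theorem max_eq_sorted_last (arr : List Int) (h : arr ≠ []) :
    (PySem.List.max? arr (fun x => x)).getD 0 =
      (PySem.List.pyGet? (PySem.List.sorted arr (fun x => x) false)
        (((PySem.List.sorted arr (fun x => x) false).length : Int) - 1)).getD 0 := by
  set a := PySem.List.sorted arr (fun x => x) false with ha
  have hne : a ≠ [] := by
    rw [ha]
    simpa [PySem.List.sorted_eq_nil_iff] using h
  have hlen : 0 < a.length := List.length_pos_iff.mpr hne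
  have hcast : ((a.length : Int) - 1) = ((a.length - 1 : Nat) : Int) := by omega
  rw [hcast, PySem.List.pyGet?_natCast, List.getElem?_eq_getElem (by omega)]
  obtain ⟨m, hm⟩ : ∃ m, PySem.List.max? arr (fun x => x) = some m := by
    cases hmx : PySem.List.max? arr (fun x => x) with
    | none => exact absurd ((PySem.List.max?_eq_none_iff arr (fun x => x)).mp hmx) h
    | some m => exact ⟨m, rfl⟩
  rw [hm]
  simp only [Option.getD_some]
  have hmem : m ∈ arr := PySem.List.max?_mem hm
  have hmax : ∀ y ∈ arr, y ≤ m := by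
    intro y hy
    simpa using PySem.List.max?_isMax hm y hy
  have h1 : a[a.length - 1]'(by omega) ≤ m :=
    hmax _ (((PySem.List.sorted_perm arr (fun x => x) false).mem_iff).mp
      (by rw [ha] at *; exact List.getElem_mem _))
  have hma : m ∈ a := by
    rw [ha]
    exact ((PySem.List.sorted_perm arr (fun x => x) false).mem_iff).mpr hmem
  obtain ⟨i, hi, hieq⟩ := List.mem_iff_getElem.mp hma
  have h2 : m ≤ a[a.length - 1]'(by omega) := by
    rw [← hieq]
    have := PySem.List.key_sorted_getElem_mono arr (fun x => x)
      (p := i) (q := a.length - 1) (by rw [ha] at hi ⊢; omega) (by rw [ha] at hlen ⊢; omega)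
    simpa [ha] using this
  omega

-- ===== VERDICT (by name: the statement is the Claim_ definition above) =====
theorem findBestValue_spec : Claim_equal_findBestValue := by
  intro arr target _hdom hpre
  unfold Spec_findBestValue findBestValue findBestValue_alt
  rw [max_eq_sorted_last arr hpre]
  exact loops_eq arr target _ _ _ _ _ _ (Or.inl ⟨rfl, rfl, rfl⟩)
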